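-- pv_equiv track=rewrite | github.com/pavlovicaleksandar/GI-project | genomics/main.py | make_occurrences_matrix
-- ===== SOURCE A (Python) =====
-- def make_occurrences_matrix(bw):
--     """ Given BWT string bw, returns a map of lists. Keys are
--     characters and lists are cumulative # of occurrences up to and
--     including the row. """
--     tots = {}
--     occ_matrix = {}
--     for c in bw:
--         if c not in tots:
--             tots[c] = 0
--             occ_matrix[c] = []
--     for c in bw:
--         tots[c] += 1
--         for c in tots.keys():
--             occ_matrix[c].append(tots[c])
--     return occ_matrix, tots
-- ===== SOURCE B (Python) =====
-- def make_occurrences_matrix(bw):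
--     """ Given BWT string bw, returns a map of lists. Keys are
--     characters and lists are cumulative # of occurrences up to and
--     including the row. """
--     keys = []
--     for c in bw:
--         if c not in keys:
--             keys.append(c)
--     occ_matrix = {}
--     tots = {}
--     for c in keys:
--         run = 0
--         col = []
--         for x in bw:
--             if x == c:
--                 run += 1
--             col.append(run)
--         occ_matrix[c] = col
--         tots[c] = run
--     return occ_matrix, tots
-- ===== Notes on version B (the rewrite author's own statement) =====
-- stated objective: alternative
-- what changed: Transposed the traversal: instead of A's position-outer loop that mutates per-key running dicts and appends to every key's list at each row, B first collects the distinct characters in first-appearance order and then builds each character's whole cumulative column (and its total) in one independent scan per key, with no dict mutation inside the scan.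
import Mathlib
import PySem

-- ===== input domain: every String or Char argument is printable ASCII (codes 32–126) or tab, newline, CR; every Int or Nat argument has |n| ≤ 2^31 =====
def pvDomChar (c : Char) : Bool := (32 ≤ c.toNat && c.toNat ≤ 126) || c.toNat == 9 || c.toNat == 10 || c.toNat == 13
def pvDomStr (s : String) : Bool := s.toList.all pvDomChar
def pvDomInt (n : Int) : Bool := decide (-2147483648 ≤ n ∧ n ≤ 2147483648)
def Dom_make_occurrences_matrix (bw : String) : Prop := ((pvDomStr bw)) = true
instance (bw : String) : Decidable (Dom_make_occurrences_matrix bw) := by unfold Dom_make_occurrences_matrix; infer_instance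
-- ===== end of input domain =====

-- B transposes A's row-major loop (position-outer, mutating every key's list each row) into one
-- independent cumulative scan per distinct character; alternative decomposition, same asymptotic cost.

-- ===== PORT A =====
-- iterating a Python string yields its characters as 1-character strings
def pvChars (bw : String) : List String := bw.toList.map (fun c => String.ofList [c])

def make_occurrences_matrix (bw : String) : (List (String × List Int)) × (List (String × Int)) :=
  let cs := pvChars bw
  -- first loop: "if c not in tots: tots[c] = 0; occ_matrix[c] = []"
  let init := cs.foldl
    (fun (st : PySem.Dict String Int × PySem.Dict String (List Int)) c =>
      if st.1.contains c then st else (st.1.insert c 0, st.2.insert c []))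
    (PySem.Dict.empty, PySem.Dict.empty)
  -- second loop: "tots[c] += 1; for k in tots.keys(): occ_matrix[k].append(tots[k])"
  -- (the keys are always present here, so modify/getD with a default are exact for += / [] / append)
  let fin := cs.foldl
    (fun (st : PySem.Dict String Int × PySem.Dict String (List Int)) c =>
      let tots := st.1.modify c 0 (· + 1)
      let occ := tots.keys.foldl (fun o k => o.modify k [] (· ++ [tots.getD k 0])) st.2
      (tots, occ))
    init
  (fin.2.items, fin.1.items)

-- ===== PORT B =====
def make_occurrences_matrix_alt (bw : String) : (List (String × List Int)) × (List (String × Int)) :=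
  let cs := pvChars bw
  -- "keys = []; for c in bw: if c not in keys: keys.append(c)"
  let keys := cs.foldl PySem.Set.add ([] : PySem.Set String)
  -- "for c in keys: run = 0; col = []; for x in bw: if x == c: run += 1; col.append(run); occ_matrix[c] = col; tots[c] = run"
  let fin := keys.foldl
    (fun (st : PySem.Dict String (List Int) × PySem.Dict String Int) c =>
      let rc := cs.foldl
        (fun (p : Int × List Int) x =>
          let r := if x == c then p.1 + 1 else p.1
          (r, p.2 ++ [r]))
        ((0 : Int), ([] : List Int))
      (st.1.insert c rc.2, st.2.insert c rc.1))
    (PySem.Dict.empty, PySem.Dict.empty)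
  (fin.1.items, fin.2.items)

-- ===== PRECONDITION & SPEC =====
def Spec_make_occurrences_matrix (bw : String) (out : (List (String × List Int)) × (List (String × Int))) : Prop := out = make_occurrences_matrix_alt bw
instance (bw : String) (out : (List (String × List Int)) × (List (String × Int))) : Decidable (Spec_make_occurrences_matrix bw out) := by unfold Spec_make_occurrences_matrix; infer_instance

-- ===== CLAIM (what is proved, stated in full; the proofs are below) =====
def Claim_equal_make_occurrences_matrix : Prop := ∀ (bw : String), Dom_make_occurrences_matrix bw → Spec_make_occurrences_matrix bw (make_occurrences_matrix bw)

-- ===== LEMMAS AND PROOFS =====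

-- cumulative occurrence column of key c over cs, starting from running count r
def pvCum (c : String) (cs : List String) (r : Int) : List Int :=
  match cs with
  | [] => []
  | x :: xs => let r' := if x == c then r + 1 else r
               r' :: pvCum c xs r'

theorem pvCum_cons (c x : String) (xs : List String) (r : Int) :
    pvCum c (x :: xs) r
      = (if x == c then r + 1 else r) :: pvCum c xs (if x == c then r + 1 else r) := rfl

-- B's inner scan computes (run, col) = (r0 + count, acc ++ cumulative column)
theorem pvInner (c : String) (cs : List String) (r0 : Int) (acc : List Int) :
    cs.foldl (fun (p : Int × List Int) x =>
        let r := if x == c then p.1 + 1 else p.1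
        (r, p.2 ++ [r])) (r0, acc)
      = (r0 + cs.count c, acc ++ pvCum c cs r0) := by
  induction cs generalizing r0 acc with
  | nil => simp [pvCum]
  | cons x xs ih =>
    simp only [List.foldl_cons, ih, pvCum_cons, List.count_cons]
    by_cases h : x = c
    · simp [h]; ring
    · have hb : (x == c) = false := by simp [h]
      have hb2 : (c == x) = false := by simp [Ne.symm h]
      simp [hb]

-- filter of a key-value map over distinct keys picks exactly one pair
theorem pvFilterMap (ks : List String) (v : String → Int) (c : String)
    (hnd : ks.Nodup) (hc : c ∈ ks) :
    List.map (fun x => x.2) (List.filter (fun p => p.1 == c) (ks.map (fun k => (k, v k)))) = [v c] := by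
  induction ks with
  | nil => cases hc
  | cons k ks ih =>
    simp only [List.map_cons, List.filter_cons]
    by_cases h : k = c
    · subst h
      have : ∀ p ∈ ks.map (fun k => (k, v k)), (p.1 == k) = false := by
        intro p hp
        obtain ⟨a, ha, rfl⟩ := List.mem_map.mp hp
        have : a ≠ k := fun e => (List.nodup_cons.mp hnd).1 (e ▸ ha)
        simpa using this
      rw [List.filter_eq_nil_iff.mpr (fun a ha => by simp [this a ha])]
      simp
    · have hb : (k == c) = false := by simp [h]
      have hc' : c ∈ ks := by cases hc with
        | head => exact absurd rfl h
        | tail _ h' => exact h'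
      simp only [hb] at *
      simpa [hb] using ih (List.nodup_cons.mp hnd).2 hc'

-- ===== A, first loop =====
theorem pvAInit (cs : List String)
    (t : PySem.Dict String Int) (o : PySem.Dict String (List Int))
    (hk : t.keys = o.keys) (hnd : t.keys.Nodup)
    (h0 : ∀ k, t.getD k 0 = 0) (h1 : ∀ k, o.getD k [] = []) :
    let r := cs.foldl
      (fun (st : PySem.Dict String Int × PySem.Dict String (List Int)) c =>
        if st.1.contains c then st else (st.1.insert c 0, st.2.insert c [])) (t, o)
    r.1.keys = PySem.Set.update t.keys cs ∧ r.2.keys = r.1.keys ∧ r.1.keys.Nodup ∧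
      (∀ k, r.1.getD k 0 = 0) ∧ (∀ k, r.2.getD k [] = []) := by
  induction cs generalizing t o with
  | nil => simpa [PySem.Set.update_nil] using ⟨hk.symm, hnd, h0, h1⟩
  | cons x xs ih =>
    simp only [List.foldl_cons]
    by_cases hct : t.contains x = true
    · have hmem : x ∈ t.keys := by
        have := PySem.Dict.contains_eq_decide_mem_keys t x
        rw [hct] at this; exact of_decide_eq_true this.symm
      rw [hct]
      simpa [PySem.Set.update_cons, PySem.Set.add, hmem] using ih t o hk hnd h0 h1
    · have hct' : t.contains x = false := by simpa using hct
      have hmem : x ∉ t.keys := by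
        have := PySem.Dict.contains_eq_decide_mem_keys t x
        intro hm; rw [hct'] at this; exact absurd (this.symm ▸ decide_eq_true hm) (by simp)
      have hco : o.contains x = false := by
        have := PySem.Dict.contains_eq_decide_mem_keys o x
        rw [this, ← hk]; simpa using hmem
      rw [if_neg (by simp [hct'])]
      have hstep := ih (t.insert x 0) (o.insert x [])
        (by rw [PySem.Dict.keys_insert_of_not_contains _ _ hct',
                PySem.Dict.keys_insert_of_not_contains _ _ hco, hk])
        (by rw [PySem.Dict.keys_insert_of_not_contains _ _ hct']
            refine (List.nodup_append).mpr ⟨hnd, by simp, ?_⟩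
            intro a ha b hb
            simp only [List.mem_singleton] at hb
            exact fun e => hmem ((hb ▸ e) ▸ ha))
        (by intro k; rw [PySem.Dict.getD_insert]; split <;> simp [h0])
        (by intro k; rw [PySem.Dict.getD_insert]; split <;> simp [h1])
      rw [PySem.Dict.keys_insert_of_not_contains _ _ hct'] at hstep
      simpa [PySem.Set.update_cons, PySem.Set.add, hmem] using hstep
  
-- ===== A, second loop =====
theorem pvAMain (l : List String) (K : List String) (hnd : K.Nodup)
    (t : PySem.Dict String Int) (o : PySem.Dict String (List Int))
    (hkt : t.keys = K) (hko : o.keys = K) (hsub : ∀ x ∈ l, x ∈ K)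
    (cnt : String → Int) (g : String → List Int)
    (ht : ∀ k, t.getD k 0 = cnt k) (ho : ∀ k ∈ K, o.getD k [] = g k) :
    let r := l.foldl
      (fun (st : PySem.Dict String Int × PySem.Dict String (List Int)) c =>
        let tots := st.1.modify c 0 (· + 1)
        let occ := tots.keys.foldl (fun o k => o.modify k [] (· ++ [tots.getD k 0])) st.2
        (tots, occ)) (t, o)
    r.1.keys = K ∧ r.2.keys = K ∧
      (∀ k, r.1.getD k 0 = cnt k + l.count k) ∧
      (∀ k ∈ K, r.2.getD k [] = g k ++ pvCum k l (cnt k)) := by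
  induction l generalizing t o cnt g with
  | nil => simpa [pvCum] using ⟨hkt, hko, ht, ho⟩
  | cons x xs ih =>
    have hx : x ∈ K := hsub x (by simp)
    have hcx : t.contains x = true := by
      rw [PySem.Dict.contains_eq_decide_mem_keys, hkt]; exact decide_eq_true hx
    simp only [List.foldl_cons]
    set tots := t.modify x 0 (· + 1) with htots
    have hktots : tots.keys = K := by
      rw [htots, PySem.Dict.keys_modify, PySem.Dict.keys_insert_of_contains _ _ hcx, hkt]
    have hgtots : ∀ k, tots.getD k 0 = (if k = x then cnt k + 1 else cnt k) := by
      intro k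
      rw [htots, PySem.Dict.getD_modify]
      split <;> simp_all
    set occ := tots.keys.foldl (fun o k => o.modify k [] (· ++ [tots.getD k 0])) o with hocc
    have hocc2 : occ = (K.map (fun k => (k, tots.getD k 0))).foldl
        (fun d p => d.modify p.1 [] (· ++ [p.2])) o := by
      rw [hocc, hktots, List.foldl_map]
    have hkocc : occ.keys = K := by
      rw [hocc2,
          PySem.Dict.keys_foldl_modify_key (K.map (fun k => (k, tots.getD k 0))) Prod.fst []
            (fun _ p v => v ++ [p.2]) o, hko]
      rw [PySem.Set.update_eq_append_filter]
      have : ∀ y ∈ PySem.Set.ofList (List.map (fun p => p.1) (K.map (fun k => (k, tots.getD k 0)))),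
          ¬ ((!PySem.Set.contains K y) = true) := by
        intro y hy
        simp only [List.map_map] at hy
        have : y ∈ K := by
          have := (PySem.Set.mem_ofList _ y).mp hy
          simpa using this
        simp [PySem.Set.contains, this]
      rw [List.filter_eq_nil_iff.mpr this]
      simp
    have hgocc : ∀ k ∈ K, occ.getD k [] = g k ++ [if k = x then cnt k + 1 else cnt k] := by
      intro k hk
      rw [hocc2, PySem.Dict.getD_foldl_modify_append, ho k hk,
          pvFilterMap K (fun k => tots.getD k 0) k hnd hk, hgtots]
    have hstep := ih tots occ hktots hkocc
      (fun a ha => hsub a (by simp [ha]))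
      (fun k => if k = x then cnt k + 1 else cnt k)
      (fun k => g k ++ [if k = x then cnt k + 1 else cnt k])
      hgtots hgocc
    refine ⟨hstep.1, hstep.2.1, ?_, ?_⟩
    · intro k
      rw [hstep.2.2.1 k]
      by_cases h : k = x
      · subst h
        simp
        ring
      · have : (x == k) = false := by simpa using (Ne.symm h)
        simp [List.count_cons, this, h]
    · intro k hk
      rw [hstep.2.2.2 k hk, pvCum_cons]
      have heq : (if x == k then cnt k + 1 else cnt k) = (if k = x then cnt k + 1 else cnt k) := by
        by_cases h : k = x
        · subst h; simp
        · have hb : (x == k) = false := by simpa using Ne.symm h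
          simp [hb, h]
      rw [heq]
      simp

-- ===== B, outer loop =====
theorem pvBOuter (ks : List String) (hnd : ks.Nodup)
    (col : String → List Int) (run : String → Int)
    (o : PySem.Dict String (List Int)) (t : PySem.Dict String Int)
    (ho : ∀ k ∈ ks, o.contains k = false) (ht : ∀ k ∈ ks, t.contains k = false) :
    let r := ks.foldl
      (fun (st : PySem.Dict String (List Int) × PySem.Dict String Int) c =>
        (st.1.insert c (col c), st.2.insert c (run c))) (o, t)
    r.1.items = o.items ++ ks.map (fun c => (c, col c)) ∧
      r.2.items = t.items ++ ks.map (fun c => (c, run c)) := by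
  induction ks generalizing o t with
  | nil => simp
  | cons k ks ih =>
    have hok := ho k (by simp)
    have htk := ht k (by simp)
    have hstep := ih (List.nodup_cons.mp hnd).2 (o.insert k (col k)) (t.insert k (run k))
      (by intro a ha
          rw [PySem.Dict.contains_insert]
          have : a ≠ k := fun e => (List.nodup_cons.mp hnd).1 (e ▸ ha)
          simp [this, ho a (by simp [ha])])
      (by intro a ha
          rw [PySem.Dict.contains_insert]
          have : a ≠ k := fun e => (List.nodup_cons.mp hnd).1 (e ▸ ha)
          simp [this, ht a (by simp [ha])])
    simp only [List.foldl_cons] at *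
    rw [hstep.1, hstep.2,
        PySem.Dict.items_insert_of_not_contains _ _ hok,
        PySem.Dict.items_insert_of_not_contains _ _ htk] at *
    simp

-- A's result in closed form: keys in first-appearance order, cumulative columns, totals
theorem pvA_eq (bw : String) :
    make_occurrences_matrix bw =
      ((PySem.Set.ofList (pvChars bw)).map (fun k => (k, pvCum k (pvChars bw) 0)),
       (PySem.Set.ofList (pvChars bw)).map (fun k => (k, (List.count k (pvChars bw) : Int)))) := by
  unfold make_occurrences_matrix
  dsimp only
  set cs := pvChars bw with hcs
  obtain ⟨hk1, hk2, hnd0, h40, h50⟩ :=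
    pvAInit cs PySem.Dict.empty PySem.Dict.empty (by simp) (by simp) (by intro k; simp) (by intro k; simp)
  set a := cs.foldl
      (fun (st : PySem.Dict String Int × PySem.Dict String (List Int)) c =>
        if st.1.contains c then st else (st.1.insert c 0, st.2.insert c []))
      (PySem.Dict.empty, PySem.Dict.empty) with ha
  simp only [PySem.Dict.keys_empty, PySem.Set.update_nil_left] at hk1
  have hk2' : a.2.keys = PySem.Set.ofList cs := by rw [hk2, hk1]
  have hndK : (PySem.Set.ofList cs).Nodup := PySem.Set.nodup_ofList cs
  have hmain := pvAMain cs (PySem.Set.ofList cs) hndK a.1 a.2 hk1 hk2'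
    (fun x hx => (PySem.Set.mem_ofList cs x).mpr hx) (fun _ => 0) (fun _ => []) h40 (fun k _ => h50 k)
  rw [Prod.mk.eta] at hmain
  obtain ⟨hA1, hA2, hA3, hA4⟩ := hmain
  set fin := cs.foldl
      (fun (st : PySem.Dict String Int × PySem.Dict String (List Int)) c =>
        let tots := st.1.modify c 0 (· + 1)
        let occ := tots.keys.foldl (fun o k => o.modify k [] (· ++ [tots.getD k 0])) st.2
        (tots, occ)) a with hfin
  have hndo : fin.2.keys.Nodup := by rw [hA2]; exact hndK
  have hndt : fin.1.keys.Nodup := by rw [hA1]; exact hndK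
  rw [PySem.Dict.items_eq_map_keys fin.2 hndo [], PySem.Dict.items_eq_map_keys fin.1 hndt 0, hA1, hA2]
  simp only [Prod.mk.injEq]
  constructor
  · exact List.map_congr_left (fun k hk => by rw [hA4 k hk]; simp)
  · exact List.map_congr_left (fun k _ => by rw [hA3 k]; simp)

-- B's result in the same closed form
theorem pvB_eq (bw : String) :
    make_occurrences_matrix_alt bw =
      ((PySem.Set.ofList (pvChars bw)).map (fun k => (k, pvCum k (pvChars bw) 0)),
       (PySem.Set.ofList (pvChars bw)).map (fun k => (k, (List.count k (pvChars bw) : Int)))) := by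
  unfold make_occurrences_matrix_alt
  dsimp only
  set cs := pvChars bw with hcs
  have hkeys : cs.foldl PySem.Set.add ([] : PySem.Set String) = PySem.Set.ofList cs := rfl
  rw [hkeys]
  simp only [pvInner, zero_add, List.nil_append]
  obtain ⟨hb1, hb2⟩ := pvBOuter (PySem.Set.ofList cs) (PySem.Set.nodup_ofList cs)
    (fun c => pvCum c cs 0) (fun c => (List.count c cs : Int))
    PySem.Dict.empty PySem.Dict.empty (by intro k _; simp) (by intro k _; simp)
  rw [hb1, hb2]
  have he1 : (PySem.Dict.empty : PySem.Dict String (List Int)).items = [] := rfl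
  have he2 : (PySem.Dict.empty : PySem.Dict String Int).items = [] := rfl
  rw [he1, he2]
  simp

-- ===== VERDICT (by name: the statement is the Claim_ definition above) =====
theorem make_occurrences_matrix_spec : Claim_equal_make_occurrences_matrix := by
  intro bw _
  unfold Spec_make_occurrences_matrix
  rw [pvA_eq, pvB_eq]
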